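-- pv_equiv track=rewrite | github.com/hyunjun/practice | python/problem-string/ordering_exist.py | has_ordering
-- ===== SOURCE A (Python) =====
-- def has_ordering(inp, order):
--   d = {}
--   for i, c in enumerate(inp):
--     d[c] = i
--   prev = d[order[0]]
--   for c in order:
--     cur = d[c]
--     if prev > cur:
--       return False
--     prev = cur
--   return True
-- ===== SOURCE B (Python) =====
-- def has_ordering(inp, order):
--     d = {c: i for i, c in enumerate(inp)}
--     idxs = [d[c] for c in order]
--     return idxs == sorted(idxs)
-- ===== Notes on version B (the rewrite author's own statement) =====
-- stated objective: idiomatic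
-- what changed: B replaces A's stateful prev/cur early-return scan with building the list of last-occurrence indices of order's chars and comparing it to its sorted copy (non-decreasing iff equal to sorted).
-- outside the precondition, e.g. on has_ordering('cbca', 'acdac'): A returns False, B raises KeyError
import Mathlib
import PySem

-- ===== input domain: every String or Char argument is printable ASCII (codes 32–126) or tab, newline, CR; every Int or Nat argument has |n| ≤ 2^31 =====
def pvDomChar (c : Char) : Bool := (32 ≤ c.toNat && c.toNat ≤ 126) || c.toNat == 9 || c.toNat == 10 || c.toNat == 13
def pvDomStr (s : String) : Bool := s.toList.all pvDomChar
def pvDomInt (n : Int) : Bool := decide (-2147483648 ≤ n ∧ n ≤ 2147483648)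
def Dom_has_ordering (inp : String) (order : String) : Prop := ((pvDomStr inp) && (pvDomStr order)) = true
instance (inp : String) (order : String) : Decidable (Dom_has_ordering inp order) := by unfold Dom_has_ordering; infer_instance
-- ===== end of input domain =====

-- B replaces A's stateful prev/cur early-return scan with "list of last indices == its sorted copy" (idiomatic, same cost up to the sort).


-- ===== PORT A =====
-- the dict build 'd = {}; for i, c in enumerate(inp): d[c] = i' (B's dict comprehension builds the same dict)
def pvBuildD (inp : String) : PySem.Dict Char Int :=
  (PySem.List.enumerate inp.toList).foldl (fun d p => PySem.Dict.insert d p.2 p.1) PySem.Dict.empty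

-- 'for c in order: cur = d[c]; if prev > cur: return False; prev = cur'; none from get? = Python KeyError (outside Pre_)
def hasOrdLoopA (d : PySem.Dict Char Int) : Int → List Char → Bool
  | _, [] => true
  | prev, c :: cs =>
    match PySem.Dict.get? d c with
    | none => false
    | some cur => if prev > cur then false else hasOrdLoopA d cur cs

def has_ordering (inp : String) (order : String) : Bool :=
  match PySem.List.pyGet? order.toList 0 with
  | none => false            -- IndexError on order[0] (outside Pre_)
  | some c0 =>
    match PySem.Dict.get? (pvBuildD inp) c0 with
    | none => false          -- KeyError on d[order[0]] (outside Pre_)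
    | some prev => hasOrdLoopA (pvBuildD inp) prev order.toList

-- ===== PORT B =====
-- 'idxs = [d[c] for c in order]': left-to-right, a missing key raises KeyError = none (outside Pre_)
def has_ordering_alt (inp : String) (order : String) : Bool :=
  match order.toList.mapM (fun c => PySem.Dict.get? (pvBuildD inp) c) with
  | none => false            -- KeyError (outside Pre_)
  | some idxs => idxs == PySem.List.sorted idxs (fun x => x) false

-- ===== PRECONDITION & SPEC =====
-- Pre_ excludes the inputs where either Python raises: empty order (A's order[0] is an IndexError) and
-- order containing a char absent from inp (a KeyError — A may also early-return False before reaching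
-- the absent char, but the natural B raises KeyError there; see claim.json cites).
def Pre_has_ordering (inp : String) (order : String) : Prop :=
  order.toList ≠ [] ∧ order.toList.all (fun c => inp.toList.contains c) = true
instance (inp : String) (order : String) : Decidable (Pre_has_ordering inp order) := by
  unfold Pre_has_ordering; infer_instance
def pvWitness_has_ordering : String × String := ("abcb", "ab")

def Spec_has_ordering (inp : String) (order : String) (out : Bool) : Prop := out = has_ordering_alt inp order
instance (inp : String) (order : String) (out : Bool) : Decidable (Spec_has_ordering inp order out) := by unfold Spec_has_ordering; infer_instance

-- ===== CLAIM (what is proved, stated in full; the proofs are below) =====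
def Claim_equal_has_ordering : Prop := ∀ (inp : String) (order : String), Dom_has_ordering inp order → Pre_has_ordering inp order → Spec_has_ordering inp order (has_ordering inp order)
-- ===== LEMMAS AND PROOFS =====

-- after the dict-build fold, every char of l (and every already-present key) has a value
lemma isSome_get_build (c : Char) : ∀ (l : List Char) (s : Int) (d0 : PySem.Dict Char Int),
    (c ∈ l ∨ (PySem.Dict.get? d0 c).isSome) →
    (PySem.Dict.get? ((PySem.List.enumerate l s).foldl (fun d p => PySem.Dict.insert d p.2 p.1) d0) c).isSome := by
  intro l
  induction l with
  | nil => intro s d0 h; simpa [PySem.List.enumerate_nil] using h.resolve_left (by simp)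
  | cons a l ih =>
    intro s d0 h
    rw [PySem.List.enumerate_cons, List.foldl_cons]
    apply ih
    rcases h with h | h
    · rcases List.mem_cons.mp h with rfl | h
      · right; simp
      · left; exact h
    · right; rw [PySem.Dict.get?_insert]; split <;> simp_all

lemma mapM_isSome (f : Char → Option Int) : ∀ (cs : List Char),
    (∀ c ∈ cs, (f c).isSome) → ∃ ys, cs.mapM f = some ys := by
  intro cs
  induction cs with
  | nil => intro _; exact ⟨[], rfl⟩
  | cons a l ih =>
    intro h
    obtain ⟨ys, hys⟩ := ih (fun c hc => h c (List.mem_cons_of_mem _ hc))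
    obtain ⟨y, hy⟩ := Option.isSome_iff_exists.mp (h a List.mem_cons_self)
    exact ⟨y :: ys, by simp [List.mapM_cons, hy, hys]⟩

-- A's scan loop equals sortedness of the looked-up index list with prev prepended
lemma loopA_eq (d : PySem.Dict Char Int) : ∀ (cs : List Char) (prev : Int) (idxs : List Int),
    cs.mapM (fun c => PySem.Dict.get? d c) = some idxs →
    hasOrdLoopA d prev cs = decide ((prev :: idxs).Pairwise (· ≤ ·)) := by
  intro cs
  induction cs with
  | nil =>
    intro prev idxs h
    simp only [List.mapM_nil, Option.pure_def, Option.some.injEq, List.nil_eq] at h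
    subst h
    simp [hasOrdLoopA]
  | cons a l ih =>
    intro prev idxs h
    cases hg : PySem.Dict.get? d a with
    | none => simp [List.mapM_cons, hg] at h
    | some cur =>
      cases hm : l.mapM (fun c => PySem.Dict.get? d c) with
      | none => simp [List.mapM_cons, hg, hm] at h
      | some rest =>
        simp [List.mapM_cons, hg, hm] at h
        subst h
        simp only [hasOrdLoopA, hg]
        by_cases hpc : prev > cur
        · have : ¬ (prev :: cur :: rest).Pairwise (· ≤ ·) := by
            intro hp
            have := (List.pairwise_cons.mp hp).1 cur List.mem_cons_self
            omega
          simp [hpc, this]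
        · rw [if_neg hpc, ih cur rest hm]
          have hle : prev ≤ cur := by omega
          by_cases hp : (cur :: rest).Pairwise (· ≤ ·)
          · have : (prev :: cur :: rest).Pairwise (· ≤ ·) := by
              refine List.pairwise_cons.mpr ⟨?_, hp⟩
              intro b hb
              rcases List.mem_cons.mp hb with rfl | hb
              · exact hle
              · exact le_trans hle ((List.pairwise_cons.mp hp).1 b hb)
            simp [hp, this]
          · have : ¬ (prev :: cur :: rest).Pairwise (· ≤ ·) := fun hc => hp (List.pairwise_cons.mp hc).2
            simp [hp, this]

-- 'idxs == sorted(idxs)' is exactly sortedness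
lemma beq_sorted_eq (idxs : List Int) :
    (idxs == PySem.List.sorted idxs (fun x => x) false) = decide (idxs.Pairwise (· ≤ ·)) := by
  by_cases hp : idxs.Pairwise (· ≤ ·)
  · have : PySem.List.sorted idxs (fun x => x) false = idxs :=
      PySem.List.sorted_eq_self_of_pairwise idxs (fun x => x) (by simpa using hp)
    simp [this, hp]
  · have hne : idxs ≠ PySem.List.sorted idxs (fun x => x) false := by
      intro h
      exact hp (by simpa using h ▸ PySem.List.sorted_pairwise idxs (fun x => x))
    simp [hp, hne]

-- ===== VERDICT (by name: the statement is the Claim_ definition above) =====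
theorem has_ordering_spec : Claim_equal_has_ordering := by
  intro inp order _ hPre
  obtain ⟨hne, hmemb⟩ := hPre
  have hmem : ∀ c ∈ order.toList, c ∈ inp.toList := by simpa using hmemb
  obtain ⟨c0, cs, hol⟩ : ∃ c0 cs, order.toList = c0 :: cs := by
    cases h : order.toList with
    | nil => exact absurd h hne
    | cons c0 cs => exact ⟨c0, cs, rfl⟩
  unfold Spec_has_ordering has_ordering has_ordering_alt
  rw [hol]
  obtain ⟨idxs, hm⟩ := mapM_isSome (fun c => PySem.Dict.get? (pvBuildD inp) c) (c0 :: cs)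
    (fun c hc => isSome_get_build c inp.toList 0 PySem.Dict.empty (Or.inl (hmem c (hol ▸ hc))))
  have hm' := hm
  cases hg : PySem.Dict.get? (pvBuildD inp) c0 with
  | none => simp [List.mapM_cons, hg] at hm'
  | some i0 =>
    cases hrest : cs.mapM (fun c => PySem.Dict.get? (pvBuildD inp) c) with
    | none => simp [List.mapM_cons, hg, hrest] at hm'
    | some rest =>
      simp [List.mapM_cons, hg, hrest] at hm'
      subst hm'
      have hhead : PySem.List.pyGet? (c0 :: cs) (0 : Int) = some c0 := by
        simp [pysem]
      rw [hhead]
      simp only [hg, hm]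
      rw [loopA_eq _ (c0 :: cs) i0 (i0 :: rest) hm, beq_sorted_eq]
      simp only [decide_eq_decide]
      constructor
      · intro h; exact (List.pairwise_cons.mp h).2
      · intro h
        refine List.pairwise_cons.mpr ⟨?_, h⟩
        intro b hb
        rcases List.mem_cons.mp hb with rfl | hb
        · exact le_refl _
        · exact (List.pairwise_cons.mp h).1 b hb
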